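-- pv_equiv track=rewrite | github.com/songrise/My-study-record-2020 | Python/course_work/final_exam/Q4.py | generate
-- ===== SOURCE A (Python) =====
-- def flip(M, d):
--     """
--     A function to flip a magic square M in direction d (d is either vert or hori)
--     Input: magic square M, direction d
--     Output: return flipped magic square
--    """
--     fir = M[0]
--     sec = M[1]
--     trd = M[2]
--     if d == 'hori':
--         return [trd, sec, fir]
--     elif d == 'vert':
--         return[fir[::-1], sec[::-1], trd[::-1]]
--
-- def rotate(M, d, n):
--     """
--     A function to rotate a magic square M in direction d (d is either clock or counter) for n
--     times
--     Input: magic square M, direction d, times n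
--     Output: return rotated magic square
--     """
--     if n == 0:
--         return M
--     else:
--         fir = M[0]
--         sec = M[1]
--         trd = M[2]
--         if d == 'clock':
--             new_fir = [trd[0], sec[0], fir[0]]
--             new_sec = [trd[1], sec[1], fir[1]]
--             new_trd = [trd[2], sec[2], fir[2]]
--             new = [new_fir, new_sec, new_trd]
--
--             return rotate(new, d, n-1)
--
--         elif d == 'counter':
--             new_fir = [fir[2], sec[2], trd[2]]
--             new_sec = [fir[1], sec[1], trd[1]]
--             new_trd = [fir[0], sec[0], trd[0]]
--             new = [new_fir, new_sec, new_trd]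
--
--             return rotate(new, d, n-1)
--
-- def generate(M):
--     """
--     A function to return all the equivalent magic squares to M, including M
--     Input: magic square M
--     Output: return the list of equivalent magic squares
--    """
--     ans = []
--     ans.append(M)
--     ans.append(flip(M, 'vert'))
--     ans.append(flip(M, 'hori'))
--     ans.append(flip(rotate(M, 'clock', 1), 'hori'))
--     ans.append(flip(rotate(M, 'clock', 1), 'vert'))
--
--     for i in range(1, 4):
--         ans.append(rotate(M, 'clock', i))
--
--     return ans
-- ===== SOURCE B (Python) =====
-- def _rot(M):
--     # one clockwise rotation of the (top-left) 3x3 square, as a closed-form index map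
--     return [[M[2][c], M[1][c], M[0][c]] for c in range(3)]
--
-- def generate(M):
--     r1 = _rot(M)
--     r2 = _rot(r1)
--     r3 = _rot(r2)
--     return [M,
--             [M[0][::-1], M[1][::-1], M[2][::-1]],
--             [M[2], M[1], M[0]],
--             [r1[2], r1[1], r1[0]],
--             [row[::-1] for row in r1],
--             r1, r2, r3]
-- ===== Notes on version B (the rewrite author's own statement) =====
-- stated objective: simpler
-- what changed: Replaced the string-dispatched recursive rotate(M,d,n) and flip(M,d) helpers by a single closed-form clockwise rotation applied incrementally (r1, r2=rot(r1), r3=rot(r2)) and inline slice-based flips, building the 8-element list as one literal.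
import Mathlib
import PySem

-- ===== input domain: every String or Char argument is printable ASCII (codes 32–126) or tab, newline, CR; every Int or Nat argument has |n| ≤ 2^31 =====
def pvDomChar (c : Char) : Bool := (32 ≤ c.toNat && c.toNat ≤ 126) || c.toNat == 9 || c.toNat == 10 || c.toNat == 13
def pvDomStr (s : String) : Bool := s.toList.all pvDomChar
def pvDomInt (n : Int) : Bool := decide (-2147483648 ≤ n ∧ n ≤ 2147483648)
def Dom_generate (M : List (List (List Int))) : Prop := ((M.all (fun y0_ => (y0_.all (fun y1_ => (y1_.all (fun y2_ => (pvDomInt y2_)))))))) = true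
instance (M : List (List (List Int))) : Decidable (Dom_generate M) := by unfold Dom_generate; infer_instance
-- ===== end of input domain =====

-- B replaces A's string-dispatched recursive rotate/flip helpers by one closed-form
-- clockwise rotation applied incrementally plus inline slice flips (objective: simpler).


-- ===== PORT A =====
-- flip(M, d): getD is exact here because Pre_generate guarantees ≥ 3 rows;
-- d is always "hori" or "vert" at A's call sites (Python returns None otherwise — unreachable).
def flipA (M : List (List (List Int))) (d : String) : List (List (List Int)) :=
  let fir := M.getD 0 []
  let sec := M.getD 1 []
  let trd := M.getD 2 []
  if d = "hori" then [trd, sec, fir]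
  else if d = "vert" then [fir.reverse, sec.reverse, trd.reverse]  -- xs[::-1] = reverse (exact)
  else []

-- rotate(M, d, n): n is a non-negative literal (1..3) at every call site, so Nat recursion is exact;
-- getD is exact because the rows reached have ≥ 3 elements under Pre_generate.
def rotateA (M : List (List (List Int))) (d : String) (n : Nat) : List (List (List Int)) :=
  match n with
  | 0 => M
  | Nat.succ m =>
    let fir := M.getD 0 []
    let sec := M.getD 1 []
    let trd := M.getD 2 []
    if d = "clock" then
      rotateA [[trd.getD 0 [], sec.getD 0 [], fir.getD 0 []],
               [trd.getD 1 [], sec.getD 1 [], fir.getD 1 []],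
               [trd.getD 2 [], sec.getD 2 [], fir.getD 2 []]] d m
    else if d = "counter" then
      rotateA [[fir.getD 2 [], sec.getD 2 [], trd.getD 2 []],
               [fir.getD 1 [], sec.getD 1 [], trd.getD 1 []],
               [fir.getD 0 [], sec.getD 0 [], trd.getD 0 []]] d m
    else M  -- Python would return None: unreachable at A's call sites

def generate (M : List (List (List Int))) : List (List (List (List Int))) :=
  let ans := [M, flipA M "vert", flipA M "hori",
              flipA (rotateA M "clock" 1) "hori",
              flipA (rotateA M "clock" 1) "vert"]
  -- for i in range(1, 4): ans.append(rotate(M, 'clock', i))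
  (PySem.List.pyRange 1 4 1).foldl (fun acc i => acc ++ [rotateA M "clock" i.toNat]) ans

-- ===== PORT B =====
-- one clockwise rotation as a closed-form index map over columns 0..2
def rotB (M : List (List (List Int))) : List (List (List Int)) :=
  (List.range 3).map (fun c =>
    [(M.getD 2 []).getD c [], (M.getD 1 []).getD c [], (M.getD 0 []).getD c []])

def generate_alt (M : List (List (List Int))) : List (List (List (List Int))) :=
  let r1 := rotB M
  let r2 := rotB r1
  let r3 := rotB r2
  [M,
   [(M.getD 0 []).reverse, (M.getD 1 []).reverse, (M.getD 2 []).reverse],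
   [M.getD 2 [], M.getD 1 [], M.getD 0 []],
   [r1.getD 2 [], r1.getD 1 [], r1.getD 0 []],
   r1.map (fun row => row.reverse),
   r1, r2, r3]

-- ===== PRECONDITION & SPEC =====
-- Pre_ excludes exactly the inputs on which Python A raises IndexError:
-- generate needs at least 3 rows, and the rotation indexes columns 0..2 of the first 3 rows.
def Pre_generate (M : List (List (List Int))) : Prop :=
  3 ≤ M.length ∧ 3 ≤ (M.getD 0 []).length ∧ 3 ≤ (M.getD 1 []).length ∧ 3 ≤ (M.getD 2 []).length
instance (M : List (List (List Int))) : Decidable (Pre_generate M) := by unfold Pre_generate; infer_instance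

def pvWitness_generate : List (List (List Int)) := [[[2],[7],[6]],[[9],[5],[1]],[[4],[3],[8]]]

def Spec_generate (M : List (List (List Int))) (out : List (List (List (List Int)))) : Prop := out = generate_alt M
instance (M : List (List (List Int))) (out : List (List (List (List Int)))) : Decidable (Spec_generate M out) := by unfold Spec_generate; infer_instance

-- ===== CLAIM (what is proved, stated in full; the proofs are below) =====
def Claim_equal_generate : Prop := ∀ (M : List (List (List Int))), Dom_generate M → Pre_generate M → Spec_generate M (generate M)

-- ===== LEMMAS AND PROOFS =====

-- ===== VERDICT (by name: the statement is the Claim_ definition above) =====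
theorem generate_spec : Claim_equal_generate := by
  intro M _ hpre
  obtain ⟨h0, h1, h2, h3⟩ := hpre
  match M, h0 with
  | r0 :: r1 :: r2 :: rest, _ =>
    simp only [List.getD, List.getElem?_cons_zero, List.getElem?_cons_succ, Option.getD_some] at h1 h2 h3
    match r0, h1 with
    | a0 :: a1 :: a2 :: ar, _ =>
    match r1, h2 with
    | b0 :: b1 :: b2 :: br, _ =>
    match r2, h3 with
    | c0 :: c1 :: c2 :: cr, _ =>
      unfold Spec_generate generate generate_alt
      simp [flipA, rotateA, rotB, PySem.List.pyRange, List.range_succ]
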